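-- pv_equiv track=rewrite | github.com/AlifSrSE/ProblemSolves | 236C-lcmChallenge.py | max_lcm_of_three
-- ===== SOURCE A (Python) =====
-- from math import gcd
--
-- def lcm(a, b):
--     return a * b // gcd(a, b)
--
-- def max_lcm_of_three(n):
--     if n <= 2:
--         return n
--     if n == 3:
--         return 6
--
--     result = 0
--     start = max(1, n - 10)
--
--     for i in range(n, start - 1, -1):
--         for j in range(i - 1, start - 1, -1):
--             for k in range(j - 1, start - 1, -1):
--                 l = lcm(lcm(i, j), k)
--                 if l > result:
--                     result = l
--
--     return result
-- ===== SOURCE B (Python) =====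
-- def max_lcm_of_three(n):
--     # Closed form: for n >= 3 the maximum LCM of three integers <= n is
--     # n(n-1)(n-2) if n is odd, n(n-1)(n-3) if n is even and not divisible
--     # by 3, and (n-1)(n-2)(n-3) otherwise.  No loops, no gcd.
--     if n <= 2:
--         return n
--     if n % 2 == 1:
--         return n * (n - 1) * (n - 2)
--     if n % 3 != 0:
--         return n * (n - 1) * (n - 3)
--     return (n - 1) * (n - 2) * (n - 3)
-- ===== Notes on version B (the rewrite author's own statement) =====
-- stated objective: simpler
-- what changed: Replaced the triple nested loop over the last-11 window (with gcd/lcm computations) by a closed-form case split on n's parity and divisibility by 3.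
import Mathlib
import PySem

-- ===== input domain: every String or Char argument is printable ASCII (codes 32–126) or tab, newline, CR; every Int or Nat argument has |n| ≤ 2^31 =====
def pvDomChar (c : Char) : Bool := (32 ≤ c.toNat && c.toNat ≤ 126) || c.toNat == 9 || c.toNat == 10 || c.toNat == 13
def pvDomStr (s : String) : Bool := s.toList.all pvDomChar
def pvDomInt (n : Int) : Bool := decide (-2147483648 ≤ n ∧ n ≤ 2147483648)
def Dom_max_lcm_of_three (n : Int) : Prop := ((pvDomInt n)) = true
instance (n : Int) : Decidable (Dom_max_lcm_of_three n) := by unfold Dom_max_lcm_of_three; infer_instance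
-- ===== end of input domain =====

-- B replaces A's triple loop over the last-11 window by a closed-form case split on n (simpler); equivalence proved for all n.
-- (case split on n's parity and divisibility by 3); equivalence is proved for all n.

-- ===== PORT A =====
-- helper lcm(a, b) = a * b // gcd(a, b)  (math.gcd = Int.gcd, Python // = floordiv)
def pylcm (a b : Int) : Int := PySem.Int.floordiv (a * b) ((Int.gcd a b : Int))

def max_lcm_of_three (n : Int) : Int :=
  if n ≤ 2 then n
  else if n = 3 then 6
  else
    let start := max 1 (n - 10)
    (PySem.List.pyRange n (start - 1) (-1)).foldl (fun result i =>
      (PySem.List.pyRange (i - 1) (start - 1) (-1)).foldl (fun result j =>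
        (PySem.List.pyRange (j - 1) (start - 1) (-1)).foldl (fun result k =>
          let l := pylcm (pylcm i j) k
          if l > result then l else result) result) result) (0 : Int)

-- ===== PORT B =====
def max_lcm_of_three_alt (n : Int) : Int :=
  if n ≤ 2 then n
  else if PySem.Int.mod n 2 = 1 then n * (n - 1) * (n - 2)
  else if PySem.Int.mod n 3 ≠ 0 then n * (n - 1) * (n - 3)
  else (n - 1) * (n - 2) * (n - 3)

-- ===== PRECONDITION & SPEC =====
def Spec_max_lcm_of_three (n : Int) (out : Int) : Prop := out = max_lcm_of_three_alt n
instance (n : Int) (out : Int) : Decidable (Spec_max_lcm_of_three n out) := by unfold Spec_max_lcm_of_three; infer_instance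

-- ===== CLAIM (what is proved, stated in full; the proofs are below) =====
def Claim_equal_max_lcm_of_three : Prop := ∀ (n : Int), Dom_max_lcm_of_three n → Spec_max_lcm_of_three n (max_lcm_of_three n)

-- ===== LEMMAS AND PROOFS =====

-- the list of all lcm-values A's triple loop visits
def lcmTriples (n : Int) : List Int :=
  (PySem.List.pyRange n (max 1 (n - 10) - 1) (-1)).flatMap (fun i =>
    (PySem.List.pyRange (i - 1) (max 1 (n - 10) - 1) (-1)).flatMap (fun j =>
      (PySem.List.pyRange (j - 1) (max 1 (n - 10) - 1) (-1)).map (fun k =>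
        pylcm (pylcm i j) k)))

theorem if_gt_eq_max (l r : Int) : (if l > r then l else r) = max r l := by
  rw [max_def]; split_ifs <;> omega

theorem A_eq_fold (n : Int) (h2 : ¬ n ≤ 2) (h3 : ¬ n = 3) :
    max_lcm_of_three n = (lcmTriples n).foldl max 0 := by
  simp only [max_lcm_of_three, if_neg h2, if_neg h3, lcmTriples,
    List.foldl_flatMap, List.foldl_map, if_gt_eq_max]

theorem foldl_max_le (L : List Int) (b : Int) : ∀ r, r ≤ b → (∀ x ∈ L, x ≤ b) → L.foldl max r ≤ b := by
  induction L with
  | nil => intro r hr _; simpa using hr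
  | cons y t ih =>
      intro r hr h
      exact ih _ (max_le hr (h y (by simp))) (fun x hx => h x (by simp [hx]))

theorem le_foldl_max_init (L : List Int) : ∀ r : Int, r ≤ L.foldl max r := by
  induction L with
  | nil => intro r; simp
  | cons y t ih => intro r; exact le_trans (le_max_left r y) (ih _)

theorem le_foldl_max_mem (L : List Int) (x : Int) (hx : x ∈ L) : ∀ r : Int, x ≤ L.foldl max r := by
  induction L with
  | nil => cases hx
  | cons y t ih =>
      intro r
      rcases List.mem_cons.mp hx with h | h
      · subst h; exact le_trans (le_max_right r x) (le_foldl_max_init t _)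
      · exact ih h _

theorem foldl_max_eq (L : List Int) (b : Int) (hb : 0 ≤ b) (hmem : b ∈ L)
    (hle : ∀ x ∈ L, x ≤ b) : L.foldl max 0 = b :=
  le_antisymm (foldl_max_le L b 0 hb hle) (le_foldl_max_mem L b hmem 0)

theorem mem_lcmTriples (n x : Int) :
    x ∈ lcmTriples n ↔ ∃ i j k, max 1 (n - 10) ≤ k ∧ k < j ∧ j < i ∧ i ≤ n ∧
      x = pylcm (pylcm i j) k := by
  simp only [lcmTriples, List.mem_flatMap, List.mem_map, PySem.List.mem_pyRange_neg_one]
  constructor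
  · rintro ⟨i, ⟨hi1, hi2⟩, j, ⟨hj1, hj2⟩, k, ⟨hk1, hk2⟩, hx⟩
    exact ⟨i, j, k, by omega, by omega, by omega, hi2, hx.symm⟩
  · rintro ⟨i, j, k, hk, hkj, hji, hi, hx⟩
    exact ⟨i, ⟨by omega, hi⟩, j, ⟨by omega, by omega⟩, k, ⟨by omega, by omega⟩, hx.symm⟩

-- arithmetic about pylcm
theorem lcm_cast_pos (a b : Int) (ha : 0 < a) (hb : 0 < b) : 0 < (Int.lcm a b : Int) := by
  have h := Int.gcd_mul_lcm a b
  have : Int.lcm a b ≠ 0 := by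
    intro h0
    rw [h0, Nat.mul_zero] at h
    have := Int.natAbs_pos.mpr (by omega : a ≠ 0)
    have := Int.natAbs_pos.mpr (by omega : b ≠ 0)
    nlinarith
  exact_mod_cast Nat.pos_of_ne_zero this

theorem pylcm_eq (a b : Int) (ha : 0 < a) (hb : 0 < b) : pylcm a b = (Int.lcm a b : Int) := by
  have hg : 0 < Int.gcd a b := Int.gcd_pos_iff.mpr (Or.inl (by omega))
  have hgl : (Int.gcd a b : Int) * (Int.lcm a b : Int) = a * b := by
    have h := Int.gcd_mul_lcm a b
    have h1 : ((Int.gcd a b * Int.lcm a b : Nat) : Int) = ((a.natAbs * b.natAbs : Nat) : Int) := by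
      exact_mod_cast congrArg (Nat.cast : Nat → Int) h
    push_cast at h1
    rw [abs_of_nonneg (by omega : (0:Int) ≤ a), abs_of_nonneg (by omega : (0:Int) ≤ b)] at h1
    exact h1
  rw [pylcm, PySem.Int.floordiv_eq_ediv_of_pos (by exact_mod_cast hg), ← hgl,
    Int.mul_ediv_cancel_left _ (by exact_mod_cast hg.ne')]

theorem mul_lcm_le (a b d : Int) (ha : 0 < a) (hb : 0 < b) (hd : 0 < d)
    (h1 : d ∣ a) (h2 : d ∣ b) : d * (Int.lcm a b : Int) ≤ a * b := by
  have hdg : d.toNat ∣ Int.gcd a b := by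
    apply Int.dvd_gcd <;> rwa [Int.toNat_of_nonneg (by omega)]
  have hle : d ≤ (Int.gcd a b : Int) := by
    have := Nat.le_of_dvd (Int.gcd_pos_iff.mpr (Or.inl (by omega : a ≠ 0))) hdg
    omega
  have hgl : (Int.gcd a b : Int) * (Int.lcm a b : Int) = a * b := by
    have h := Int.gcd_mul_lcm a b
    have h1 : ((Int.gcd a b * Int.lcm a b : Nat) : Int) = ((a.natAbs * b.natAbs : Nat) : Int) := by
      exact_mod_cast congrArg (Nat.cast : Nat → Int) h
    push_cast at h1
    rw [abs_of_nonneg (by omega : (0:Int) ≤ a), abs_of_nonneg (by omega : (0:Int) ≤ b)] at h1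
    exact h1
  calc d * (Int.lcm a b : Int) ≤ (Int.gcd a b : Int) * (Int.lcm a b : Int) := by
        have : (0:Int) ≤ (Int.lcm a b : Int) := by positivity
        exact mul_le_mul_of_nonneg_right hle this
    _ = a * b := hgl

theorem lcm_eq_mul_of_coprime (a b : Int) (ha : 0 < a) (hb : 0 < b)
    (h : IsCoprime a b) : (Int.lcm a b : Int) = a * b := by
  have hg : Int.gcd a b = 1 := Int.isCoprime_iff_gcd_eq_one.mp h
  have h := Int.gcd_mul_lcm a b
  rw [hg, Nat.one_mul] at h
  rw [h]
  push_cast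
  rw [abs_of_nonneg (by omega : (0:Int) ≤ a), abs_of_nonneg (by omega : (0:Int) ≤ b)]

theorem pylcm3_le_prod (i j k : Int) (hi : 0 < i) (hj : 0 < j) (hk : 0 < k) :
    pylcm (pylcm i j) k ≤ i * j * k := by
  rw [pylcm_eq i j hi hj, pylcm_eq _ _ (lcm_cast_pos i j hi hj) hk]
  have h1 : (Int.lcm i j : Int) ≤ i * j := by
    have := mul_lcm_le i j 1 hi hj one_pos (one_dvd _) (one_dvd _); omega
  have h2 : (Int.lcm ((Int.lcm i j : Int)) k : Int) ≤ (Int.lcm i j : Int) * k := by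
    have := mul_lcm_le _ k 1 (lcm_cast_pos i j hi hj) hk one_pos (one_dvd _) (one_dvd _); omega
  calc (Int.lcm ((Int.lcm i j : Int)) k : Int) ≤ (Int.lcm i j : Int) * k := h2
    _ ≤ i * j * k := mul_le_mul_of_nonneg_right h1 (by omega)

-- d divides two of the three arguments → d * lcm3 ≤ i*j*k
theorem mul_pylcm3_le (i j k d : Int) (hi : 0 < i) (hj : 0 < j) (hk : 0 < k) (hd : 0 < d)
    (hcase : (d ∣ i ∧ d ∣ j) ∨ ((d ∣ i ∨ d ∣ j) ∧ d ∣ k)) :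
    d * pylcm (pylcm i j) k ≤ i * j * k := by
  rw [pylcm_eq i j hi hj, pylcm_eq _ _ (lcm_cast_pos i j hi hj) hk]
  have hLpos := lcm_cast_pos i j hi hj
  rcases hcase with ⟨h1, h2⟩ | ⟨h1, h2⟩
  · -- d divides i and j: d * lcm(i,j) ≤ i*j, then multiply by k
    have hL : d * (Int.lcm i j : Int) ≤ i * j := mul_lcm_le i j d hi hj hd h1 h2
    have h3 : (Int.lcm ((Int.lcm i j : Int)) k : Int) ≤ (Int.lcm i j : Int) * k := by
      have := mul_lcm_le _ k 1 hLpos hk one_pos (one_dvd _) (one_dvd _); omega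
    calc d * (Int.lcm ((Int.lcm i j : Int)) k : Int)
        ≤ d * ((Int.lcm i j : Int) * k) := by
          exact mul_le_mul_of_nonneg_left h3 (by omega)
      _ = (d * (Int.lcm i j : Int)) * k := by ring
      _ ≤ i * j * k := mul_le_mul_of_nonneg_right hL (by omega)
  · -- d divides (i or j) and k: d divides lcm(i,j), so d * lcm3 ≤ lcm(i,j)*k ≤ i*j*k
    have hdL : d ∣ (Int.lcm i j : Int) := by
      rcases h1 with h | h
      · exact dvd_trans h (Int.dvd_lcm_left i j)
      · exact dvd_trans h (Int.dvd_lcm_right i j)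
    have h3 : d * (Int.lcm ((Int.lcm i j : Int)) k : Int) ≤ (Int.lcm i j : Int) * k :=
      mul_lcm_le _ k d hLpos hk hd hdL h2
    have h4 : (Int.lcm i j : Int) * k ≤ i * j * k := by
      have : (Int.lcm i j : Int) ≤ i * j := by
        have := mul_lcm_le i j 1 hi hj one_pos (one_dvd _) (one_dvd _); omega
      exact mul_le_mul_of_nonneg_right this (by omega)
    omega

theorem pylcm3_eq_prod (i j k : Int) (hi : 0 < i) (hj : 0 < j) (hk : 0 < k)
    (h1 : IsCoprime i j) (h2 : IsCoprime (i * j) k) :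
    pylcm (pylcm i j) k = i * j * k := by
  rw [pylcm_eq i j hi hj, lcm_eq_mul_of_coprime i j hi hj h1,
    pylcm_eq _ _ (mul_pos hi hj) hk, lcm_eq_mul_of_coprime _ _ (mul_pos hi hj) hk h2]

theorem prod3_le (i j k a b c : Int) (hk : 0 < k) (hj : 0 < j) (hi : 0 < i)
    (h1 : i ≤ a) (h2 : j ≤ b) (h3 : k ≤ c) : i * j * k ≤ a * b * c := by
  have hab : i * j ≤ a * b := mul_le_mul h1 h2 (by omega) (by omega)
  exact mul_le_mul hab h3 (by omega) (mul_nonneg (by omega) (by omega))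

-- the closed form is an upper bound for every visited triple
theorem triple_bound (n i j k : Int) (h4 : 4 ≤ n)
    (hk : max 1 (n - 10) ≤ k) (hkj : k < j) (hji : j < i) (hi : i ≤ n) :
    pylcm (pylcm i j) k ≤ max_lcm_of_three_alt n := by
  have hk1 : 1 ≤ k := le_trans (le_max_left 1 (n - 10)) hk
  have hkpos : 0 < k := by omega
  have hjpos : 0 < j := by omega
  have hipos : 0 < i := by omega
  have hprod := pylcm3_le_prod i j k hipos hjpos hkpos
  have hmod2 := PySem.Int.mod_eq_emod_of_pos (a := n) (b := 2) (by norm_num)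
  have hmod3 := PySem.Int.mod_eq_emod_of_pos (a := n) (b := 3) (by norm_num)
  rw [max_lcm_of_three_alt, if_neg (by omega : ¬ n ≤ 2)]
  by_cases hodd : PySem.Int.mod n 2 = 1
  · -- n odd: lcm3 ≤ i*j*k ≤ n(n-1)(n-2)
    rw [if_pos hodd]
    calc pylcm (pylcm i j) k ≤ i * j * k := hprod
      _ ≤ n * (n - 1) * (n - 2) :=
          prod3_le _ _ _ _ _ _ hkpos hjpos hipos hi (by omega) (by omega)
  · rw [if_neg hodd]
    have heven : n % 2 = 0 := by rw [hmod2] at hodd; omega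
    by_cases h3 : PySem.Int.mod n 3 ≠ 0
    · -- n even, 3 ∤ n: bound n(n-1)(n-3)
      rw [if_pos h3]
      by_cases hin : i = n
      · by_cases hjn : j = n - 1
        · by_cases hkn : k = n - 2
          · -- (n, n-1, n-2): 2 divides the outer two
            rw [hin, hjn, hkn]
            have h2d := mul_pylcm3_le n (n-1) (n-2) 2 (by omega) (by omega) (by omega)
              (by norm_num) (Or.inr ⟨Or.inl (by omega), by omega⟩)
            have hcmp : n * (n-1) * (n-2) ≤ 2 * (n * (n-1) * (n-3)) := by
              calc n * (n-1) * (n-2) ≤ n * (n-1) * (2 * (n-3)) :=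
                    mul_le_mul_of_nonneg_left (by omega)
                      (mul_nonneg (by omega) (by omega))
                _ = 2 * (n * (n-1) * (n-3)) := by ring
            linarith
          · -- k ≤ n-3
            rw [hin, hjn]
            calc pylcm (pylcm n (n-1)) k ≤ n * (n-1) * k :=
                  pylcm3_le_prod _ _ _ (by omega) (by omega) hkpos
              _ ≤ n * (n-1) * (n-3) :=
                  mul_le_mul_of_nonneg_left (by omega) (mul_nonneg (by omega) (by omega))
        · -- j ≤ n-2, k ≤ n-3
          rw [hin]
          calc pylcm (pylcm n j) k ≤ n * j * k :=
                pylcm3_le_prod _ _ _ (by omega) hjpos hkpos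
            _ ≤ n * (n-2) * (n-3) :=
                prod3_le _ _ _ _ _ _ hkpos hjpos (by omega) (le_refl n) (by omega) (by omega)
            _ ≤ n * (n-1) * (n-3) := by
                nlinarith [mul_nonneg (show (0:Int) ≤ n by omega) (show (0:Int) ≤ n-3 by omega)]
      · -- i ≤ n-1
        calc pylcm (pylcm i j) k ≤ i * j * k := hprod
          _ ≤ (n-1) * (n-2) * (n-3) :=
              prod3_le _ _ _ _ _ _ hkpos hjpos hipos (by omega) (by omega) (by omega)
          _ ≤ n * (n-1) * (n-3) := by
              nlinarith [mul_nonneg (show (0:Int) ≤ n-1 by omega) (show (0:Int) ≤ n-3 by omega)]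
    · -- n even, 3 ∣ n (so n ≥ 6): bound (n-1)(n-2)(n-3)
      rw [if_neg h3]
      have hm3 : n % 3 = 0 := by rw [hmod3] at h3; omega
      have h6 : 6 ≤ n := by omega
      by_cases hin : i = n
      · by_cases hjn : j = n - 1
        · by_cases hkn : k = n - 2
          · rw [hin, hjn, hkn]
            have h2d := mul_pylcm3_le n (n-1) (n-2) 2 (by omega) (by omega) (by omega)
              (by norm_num) (Or.inr ⟨Or.inl (by omega), by omega⟩)
            have hcmp : n * (n-1) * (n-2) ≤ 2 * ((n-1) * (n-2) * (n-3)) := by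
              nlinarith [mul_nonneg (mul_nonneg (show (0:Int) ≤ n-1 by omega)
                (show (0:Int) ≤ n-2 by omega)) (show (0:Int) ≤ n-6 by omega)]
            linarith
          · by_cases hkn3 : k = n - 3
            · rw [hin, hjn, hkn3]
              have h3d := mul_pylcm3_le n (n-1) (n-3) 3 (by omega) (by omega) (by omega)
                (by norm_num) (Or.inr ⟨Or.inl (by omega), by omega⟩)
              have hcmp : n * (n-1) * (n-3) ≤ 3 * ((n-1) * (n-2) * (n-3)) := by
                nlinarith [mul_nonneg (mul_nonneg (show (0:Int) ≤ n-1 by omega)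
                  (show (0:Int) ≤ n-3 by omega)) (show (0:Int) ≤ 2*n-6 by omega)]
              linarith
            · -- k ≤ n - 4
              by_cases hke : k % 2 = 0
              · -- k even: 2 divides i and k
                rw [hin, hjn]
                have h2d := mul_pylcm3_le n (n-1) k 2 (by omega) (by omega) hkpos
                  (by norm_num) (Or.inr ⟨Or.inl (by omega), by omega⟩)
                have hb : n * (n-1) * k ≤ n * (n-1) * (n-4) :=
                  mul_le_mul_of_nonneg_left (by omega) (mul_nonneg (by omega) (by omega))
                have hcmp : n * (n-1) * (n-4) ≤ 2 * ((n-1) * (n-2) * (n-3)) := by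
                  nlinarith [mul_nonneg (show (0:Int) ≤ n-1 by omega)
                    (show (0:Int) ≤ (n-3)^2 + 3 by positivity)]
                linarith
              · -- k odd, so k ≤ n - 5
                rw [hin, hjn]
                have hk5 : k ≤ n - 5 := by omega
                calc pylcm (pylcm n (n-1)) k ≤ n * (n-1) * k :=
                      pylcm3_le_prod _ _ _ (by omega) (by omega) hkpos
                  _ ≤ n * (n-1) * (n-5) :=
                      mul_le_mul_of_nonneg_left (by omega) (mul_nonneg (by omega) (by omega))
                  _ ≤ (n-1) * (n-2) * (n-3) := by
                      nlinarith [show (0:Int) ≤ n-1 by omega]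
        · by_cases hjn2 : j = n - 2
          · -- (n, n-2, k): 2 divides i and j
            rw [hin, hjn2]
            have h2d := mul_pylcm3_le n (n-2) k 2 (by omega) (by omega) hkpos
              (by norm_num) (Or.inl ⟨by omega, by omega⟩)
            have hb : n * (n-2) * k ≤ n * (n-2) * (n-3) :=
              mul_le_mul_of_nonneg_left (by omega) (mul_nonneg (by omega) (by omega))
            have hcmp : n * (n-2) * (n-3) ≤ 2 * ((n-1) * (n-2) * (n-3)) := by
              nlinarith [mul_nonneg (mul_nonneg (show (0:Int) ≤ n-2 by omega)
                (show (0:Int) ≤ n-3 by omega)) (show (0:Int) ≤ n-2 by omega)]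
            linarith
          · -- j ≤ n-3, k ≤ n-4
            rw [hin]
            calc pylcm (pylcm n j) k ≤ n * j * k :=
                  pylcm3_le_prod _ _ _ (by omega) hjpos hkpos
              _ ≤ n * (n-3) * (n-4) :=
                  prod3_le _ _ _ _ _ _ hkpos hjpos (by omega) (le_refl n) (by omega) (by omega)
              _ ≤ (n-1) * (n-2) * (n-3) := by
                  nlinarith [mul_nonneg (show (0:Int) ≤ n-3 by omega)
                    (show (0:Int) ≤ n+2 by omega)]
      · calc pylcm (pylcm i j) k ≤ i * j * k := hprod
          _ ≤ (n-1) * (n-2) * (n-3) :=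
              prod3_le _ _ _ _ _ _ hkpos hjpos hipos (by omega) (by omega) (by omega)

-- the closed form is attained by a triple in the window
theorem attained (n : Int) (h4 : 4 ≤ n) : max_lcm_of_three_alt n ∈ lcmTriples n := by
  rw [mem_lcmTriples]
  have hmod2 := PySem.Int.mod_eq_emod_of_pos (a := n) (b := 2) (by norm_num)
  have hmod3 := PySem.Int.mod_eq_emod_of_pos (a := n) (b := 3) (by norm_num)
  rw [max_lcm_of_three_alt, if_neg (by omega : ¬ n ≤ 2)]
  by_cases hodd : PySem.Int.mod n 2 = 1
  · rw [if_pos hodd]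
    have h1 : n % 2 = 1 := by rw [hmod2] at hodd; omega
    obtain ⟨q, hq⟩ : ∃ q, n = 2 * q + 1 := ⟨(n - 1) / 2, by omega⟩
    refine ⟨n, n - 1, n - 2, by omega, by omega, by omega, le_refl n, ?_⟩
    rw [pylcm3_eq_prod n (n-1) (n-2) (by omega) (by omega) (by omega)
      ⟨1, -1, by ring⟩
      (IsCoprime.mul_left ⟨1 - q, q, by rw [hq]; ring⟩ ⟨1, -1, by ring⟩)]
  · rw [if_neg hodd]
    have heven : n % 2 = 0 := by rw [hmod2] at hodd; omega
    obtain ⟨m, hm⟩ : ∃ m, n = 2 * m := ⟨n / 2, by omega⟩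
    by_cases h3 : PySem.Int.mod n 3 ≠ 0
    · rw [if_pos h3]
      have hm3 : n % 3 = 1 ∨ n % 3 = 2 := by rw [hmod3] at h3; omega
      have hcop_n3 : IsCoprime n (n - 3) := by
        rcases hm3 with h | h
        · obtain ⟨q, hq⟩ : ∃ q, n = 3 * q + 1 := ⟨(n - 1) / 3, by omega⟩
          exact ⟨1 - q, q, by rw [hq]; ring⟩
        · obtain ⟨q, hq⟩ : ∃ q, n = 3 * q + 2 := ⟨(n - 2) / 3, by omega⟩
          exact ⟨1 - 2 * q, 2 * q + 1, by rw [hq]; ring⟩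
      refine ⟨n, n - 1, n - 3, by omega, by omega, by omega, le_refl n, ?_⟩
      rw [pylcm3_eq_prod n (n-1) (n-3) (by omega) (by omega) (by omega)
        ⟨1, -1, by ring⟩
        (IsCoprime.mul_left hcop_n3 ⟨2 - m, m - 1, by rw [hm]; ring⟩)]
    · rw [if_neg h3]
      have hm3 : n % 3 = 0 := by rw [hmod3] at h3; omega
      have h6 : 6 ≤ n := by omega
      refine ⟨n - 1, n - 2, n - 3, by omega, by omega, by omega, by omega, ?_⟩
      rw [pylcm3_eq_prod (n-1) (n-2) (n-3) (by omega) (by omega) (by omega)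
        ⟨1, -1, by ring⟩
        (IsCoprime.mul_left ⟨2 - m, m - 1, by rw [hm]; ring⟩ ⟨1, -1, by ring⟩)]

theorem alt_nonneg (n : Int) (h4 : 4 ≤ n) : 0 ≤ max_lcm_of_three_alt n := by
  rw [max_lcm_of_three_alt, if_neg (by omega : ¬ n ≤ 2)]
  split_ifs
  · exact le_of_lt (mul_pos (mul_pos (by omega) (by omega)) (by omega))
  · exact le_of_lt (mul_pos (mul_pos (by omega) (by omega)) (by omega))
  · exact le_of_lt (mul_pos (mul_pos (by omega) (by omega)) (by omega))

-- ===== VERDICT (by name: the statement is the Claim_ definition above) =====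
theorem max_lcm_of_three_spec : Claim_equal_max_lcm_of_three := by
  intro n _
  show max_lcm_of_three n = max_lcm_of_three_alt n
  by_cases h2 : n ≤ 2
  · rw [max_lcm_of_three, if_pos h2, max_lcm_of_three_alt, if_pos h2]
  · by_cases h3 : n = 3
    · subst h3; decide
    · have h4 : 4 ≤ n := by omega
      rw [A_eq_fold n h2 h3]
      exact foldl_max_eq _ _ (alt_nonneg n h4) (attained n h4)
        (fun x hx => by
          obtain ⟨i, j, k, hk, hkj, hji, hi, hx⟩ := (mem_lcmTriples n x).mp hx
          rw [hx]; exact triple_bound n i j k h4 hk hkj hji hi)
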